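-- pv_equiv track=rewrite | github.com/FernandGS/MA-Systems-Challenge | city/agen_simulation.py | make_default_streets_mask
-- ===== SOURCE A (Python) =====
-- def make_default_streets_mask(N: int) -> list[list[int]]:
--     """Placeholder street grid: a few vertical & horizontal corridors.
--        Replace with a real mask (or load from PNG) when you have your map."""
--     mask = [[0] * N for _ in range(N)]
--     cols = [10, 30, 50, 70, 90, 110, 130]  # tune for your grid_size
--     rows = [10, 30, 50, 70, 90, 110, 130]
--     for y in range(N):
--         for x in cols:
--             if 0 <= x < N:
--                 mask[y][x] = 1
--     for x in range(N):
--         for y in rows: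
--             if 0 <= y < N:
--                 mask[y][x] = 1
--     return mask
-- ===== SOURCE B (Python) =====
-- def make_default_streets_mask(N: int) -> list[list[int]]:
--     """Placeholder street grid: a few vertical & horizontal corridors."""
--     corridors = [10, 30, 50, 70, 90, 110, 130]
--     colset = set(c for c in corridors if c < N)
--     rowset = set(r for r in corridors if r < N)
--     ones_row = [1] * N
--     corridor_row = [1 if x in colset else 0 for x in range(N)]
--     return [ones_row.copy() if y in rowset else corridor_row.copy() for y in range(N)]
-- ===== Notes on version B (the rewrite author's own statement) =====
-- stated objective: simpler
-- what changed: Instead of zero-initializing an NxN grid and overwriting it with two corridor sweeps, B precomputes the two possible row shapes (all-ones corridor row and the vertical-corridor template row) and emits a copy of the right template per y in a single pass.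
import Mathlib
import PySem

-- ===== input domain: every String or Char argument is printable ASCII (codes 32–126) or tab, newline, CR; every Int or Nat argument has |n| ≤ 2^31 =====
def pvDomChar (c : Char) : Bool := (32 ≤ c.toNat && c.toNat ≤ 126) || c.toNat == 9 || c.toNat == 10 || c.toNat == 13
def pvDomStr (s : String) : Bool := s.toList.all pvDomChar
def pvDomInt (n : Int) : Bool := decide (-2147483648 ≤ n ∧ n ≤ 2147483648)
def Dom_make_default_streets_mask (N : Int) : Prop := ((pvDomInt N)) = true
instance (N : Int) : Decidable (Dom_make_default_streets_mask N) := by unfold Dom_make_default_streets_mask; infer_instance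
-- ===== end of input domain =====

-- B replaces A's zero grid + two in-place corridor sweeps by precomputing the two row templates
-- (all-ones row, vertical-corridor row) and emitting one copy per y in a single pass (objective: simpler).

-- ===== PORT A =====
def pvColsA : List Int := [10, 30, 50, 70, 90, 110, 130]
def pvRowsA : List Int := [10, 30, 50, 70, 90, 110, 130]

def make_default_streets_mask (N : Int) : List (List Int) :=
  -- mask = [[0] * N for _ in range(N)]
  let mask0 := (PySem.List.pyRange 0 N 1).map (fun _ => List.replicate N.toNat (0 : Int))
  -- for y in range(N): for x in cols: if 0 <= x < N: mask[y][x] = 1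
  let mask1 := (PySem.List.pyRange 0 N 1).foldl (fun m y =>
      pvColsA.foldl (fun m x =>
        if 0 ≤ x ∧ x < N then m.set y.toNat ((m.getD y.toNat []).set x.toNat 1) else m) m) mask0
  -- for x in range(N): for y in rows: if 0 <= y < N: mask[y][x] = 1
  (PySem.List.pyRange 0 N 1).foldl (fun m x =>
      pvRowsA.foldl (fun m y =>
        if 0 ≤ y ∧ y < N then m.set y.toNat ((m.getD y.toNat []).set x.toNat 1) else m) m) mask1

-- ===== PORT B =====
def pvCorridorsB : List Int := [10, 30, 50, 70, 90, 110, 130]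

def make_default_streets_mask_alt (N : Int) : List (List Int) :=
  let colset := PySem.Set.ofList (pvCorridorsB.filter (fun c => c < N))
  let rowset := PySem.Set.ofList (pvCorridorsB.filter (fun r => r < N))
  let ones_row := List.replicate N.toNat (1 : Int)
  let corridor_row := (PySem.List.pyRange 0 N 1).map (fun x => if colset.contains x then (1 : Int) else 0)
  (PySem.List.pyRange 0 N 1).map (fun y => if rowset.contains y then ones_row else corridor_row)

-- ===== PRECONDITION & SPEC =====
def Spec_make_default_streets_mask (N : Int) (out : List (List Int)) : Prop := out = make_default_streets_mask_alt N
instance (N : Int) (out : List (List Int)) : Decidable (Spec_make_default_streets_mask N out) := by unfold Spec_make_default_streets_mask; infer_instance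

-- ===== CLAIM (what is proved, stated in full; the proofs are below) =====
def Claim_equal_make_default_streets_mask : Prop := ∀ (N : Int), Dom_make_default_streets_mask N → Spec_make_default_streets_mask N (make_default_streets_mask N)

-- ===== LEMMAS AND PROOFS =====

theorem pv_pyRange_cast (N : Int) :
    PySem.List.pyRange 0 N 1 = (List.range N.toNat).map (fun k : Nat => (k : Int)) := by
  rw [PySem.List.pyRange_one]
  simp

theorem pv_set_map_range {α : Type} (g : Nat → α) (n j : Nat) (v : α) :
    ((List.range n).map g).set j v = (List.range n).map (fun i => if i = j then v else g i) := by
  apply List.ext_getElem (by simp)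
  intro i h1 h2
  simp only [List.getElem_set, List.getElem_map, List.getElem_range]
  by_cases h : i = j <;> simp [h]
  exact fun hji => absurd hji.symm h

theorem pv_getD_map_range {α : Type} [Inhabited α] (g : Nat → α) (n j : Nat) (d : α) (h : j < n) :
    ((List.range n).map g).getD j d = g j := by
  simp [List.getD_eq_getElem?_getD, h]

theorem pv_set_getD_self (m : List (List Int)) (y : Nat) : m.set y (m.getD y []) = m := by
  by_cases h : y < m.length
  · apply List.ext_getElem (by simp)
    intro i h1 h2
    simp only [List.getElem_set]
    by_cases hy : y = i <;> simp [hy, List.getD_eq_getElem?_getD, List.getElem?_eq_getElem h2]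
  · exact List.set_eq_of_length_le (by omega)

theorem pv_getD_set_self (m : List (List Int)) (y : Nat) (r : List Int) (h : y < m.length) :
    (m.set y r).getD y [] = r := by
  simp [List.getD_eq_getElem?_getD, h]

-- inner loop of A's first sweep: repeated row updates at one index y collapse to one set
theorem pv_loop1_inner (N : Int) (L : List Int) : ∀ (m : List (List Int)) (y : Nat),
    L.foldl (fun m c => if 0 ≤ c ∧ c < N then m.set y ((m.getD y []).set c.toNat 1) else m) m
    = m.set y (L.foldl (fun r c => if 0 ≤ c ∧ c < N then r.set c.toNat 1 else r) (m.getD y [])) := by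
  induction L with
  | nil => intro m y; simp only [List.foldl_nil]; rw [pv_set_getD_self]
  | cons c L ih =>
    intro m y
    simp only [List.foldl_cons]
    by_cases hc : 0 ≤ c ∧ c < N
    · rw [if_pos hc, if_pos hc, ih]
      by_cases h : y < m.length
      · rw [pv_getD_set_self m y _ h, List.set_set]
      · have h1 : m.set y ((m.getD y []).set c.toNat 1) = m := List.set_eq_of_length_le (by omega)
        have h2 : m.getD y [] = [] := by
          simp [List.getD_eq_getElem?_getD, List.getElem?_eq_none (by omega : m.length ≤ y)]
        rw [h1, h2]
        simp
    · rw [if_neg hc, if_neg hc, ih]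

-- generic row fold: setting guarded corridor columns to 1 on a range-indexed row
theorem pv_rowfold_gen (N : Int) (n : Nat) (hn : n = N.toNat) :
    ∀ (L : List Int) (h : Nat → Int),
    L.foldl (fun r c => if 0 ≤ c ∧ c < N then r.set c.toNat 1 else r) ((List.range n).map h)
    = (List.range n).map (fun (x : Nat) => if (x : Int) ∈ L ∧ (x : Int) < N then 1 else h x) := by
  intro L
  induction L with
  | nil => intro h; simp
  | cons c L ih =>
    intro h
    simp only [List.foldl_cons]
    by_cases hc : 0 ≤ c ∧ c < N
    · rw [if_pos hc, pv_set_map_range, ih]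
      apply List.map_congr_left
      intro x hx
      have hxn : x < n := List.mem_range.mp hx
      by_cases hxL : (x : Int) ∈ L ∧ (x : Int) < N
      · simp only [if_pos hxL]
        have : ((x : Int) = c ∨ (x : Int) ∈ L) ∧ (x : Int) < N := ⟨Or.inr hxL.1, hxL.2⟩
        simp [List.mem_cons, this]
      · rw [if_neg hxL]
        by_cases hxc : x = c.toNat
        · have hxi : (x : Int) = c := by omega
          have hcc : ((x : Int) ∈ c :: L ∧ (x : Int) < N) := ⟨by simp [hxi], by omega⟩
          rw [if_pos hxc, if_pos hcc]
        · have hxi : (x : Int) ≠ c := by omega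
          have hcc : ¬ ((x : Int) ∈ c :: L ∧ (x : Int) < N) := by
            rintro ⟨hm, hlt⟩
            rcases List.mem_cons.mp hm with h' | h'
            · exact hxi h'
            · exact hxL ⟨h', hlt⟩
          rw [if_neg hxc, if_neg hcc]
    · rw [if_neg hc, ih]
      apply List.map_congr_left
      intro x hx
      have hxn : x < n := List.mem_range.mp hx
      have hxN : (x : Int) < N := by omega
      have : ((x : Int) ∈ c :: L ∧ (x : Int) < N) ↔ ((x : Int) ∈ L ∧ (x : Int) < N) := by
        constructor
        · rintro ⟨hm, hlt⟩
          rcases List.mem_cons.mp hm with h' | h'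
          · exact absurd ⟨by omega, by omega⟩ hc
          · exact ⟨h', hlt⟩
        · rintro ⟨hm, hlt⟩; exact ⟨List.mem_cons_of_mem _ hm, hlt⟩
      rw [if_congr this rfl rfl]

-- A's first sweep over distinct in-range row indices updates each row once
theorem pv_loop1_gen (f : List Int → List Int) (n : Nat) :
    ∀ (L : List Nat) (g : Nat → List Int), L.Nodup → (∀ y ∈ L, y < n) →
    L.foldl (fun m y => m.set y (f (m.getD y []))) ((List.range n).map g)
    = (List.range n).map (fun i => if i ∈ L then f (g i) else g i) := by
  intro L
  induction L with
  | nil => intro g _ _; simp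
  | cons y L ih =>
    intro g hnd hlt
    have hy : y < n := hlt y (by simp)
    simp only [List.foldl_cons]
    rw [pv_getD_map_range g n y [] hy, pv_set_map_range]
    rw [ih _ (List.nodup_cons.mp hnd).2 (fun z hz => hlt z (List.mem_cons_of_mem _ hz))]
    apply List.map_congr_left
    intro i hi
    have hyL : y ∉ L := (List.nodup_cons.mp hnd).1
    by_cases hiL : i ∈ L
    · have hiy : i ≠ y := fun h => hyL (h ▸ hiL)
      simp [hiL, hiy]
    · by_cases hiy : i = y
      · simp [hiy, hyL]
      · simp [hiL, hiy]

-- inner loop of A's second sweep, acting pointwise on a range-indexed mask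
theorem pv_loop2_inner (N : Int) (n : Nat) (hn : n = N.toNat) (x : Nat) :
    ∀ (L : List Int) (g : Nat → List Int),
    L.foldl (fun m c => if 0 ≤ c ∧ c < N then m.set c.toNat ((m.getD c.toNat []).set x 1) else m)
      ((List.range n).map g)
    = (List.range n).map (fun (i : Nat) => if (i : Int) ∈ L ∧ (i : Int) < N then (g i).set x 1 else g i) := by
  intro L
  induction L with
  | nil => intro g; simp
  | cons c L ih =>
    intro g
    simp only [List.foldl_cons]
    by_cases hc : 0 ≤ c ∧ c < N
    · have hcn : c.toNat < n := by omega
      rw [if_pos hc, pv_getD_map_range g n c.toNat [] hcn, pv_set_map_range, ih]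
      apply List.map_congr_left
      intro i hi
      have hin : i < n := List.mem_range.mp hi
      by_cases hic : i = c.toNat
      · have hii : (i : Int) = c := by omega
        have hiN : (i : Int) < N := by omega
        have hmc : ((i : Int) ∈ c :: L ∧ (i : Int) < N) := ⟨by simp [hii], hiN⟩
        by_cases hiL : (i : Int) ∈ L ∧ (i : Int) < N
        · rw [if_pos hiL, if_pos hic, if_pos hmc, hic, List.set_set]
        · rw [if_neg hiL, if_pos hic, if_pos hmc, hic]
      · have hii : (i : Int) ≠ c := by omega
        have hmem : ((i : Int) ∈ c :: L ∧ (i : Int) < N) ↔ ((i : Int) ∈ L ∧ (i : Int) < N) := by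
          constructor
          · rintro ⟨hm, hlt⟩
            rcases List.mem_cons.mp hm with h' | h'
            · exact absurd h' hii
            · exact ⟨h', hlt⟩
          · rintro ⟨hm, hlt⟩; exact ⟨List.mem_cons_of_mem _ hm, hlt⟩
        rw [if_congr hmem rfl rfl]
        by_cases hiL : (i : Int) ∈ L ∧ (i : Int) < N <;> simp [hiL, hic]
    · rw [if_neg hc, ih]
      apply List.map_congr_left
      intro i hi
      have hin : i < n := List.mem_range.mp hi
      have hmem : ((i : Int) ∈ c :: L ∧ (i : Int) < N) ↔ ((i : Int) ∈ L ∧ (i : Int) < N) := by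
        constructor
        · rintro ⟨hm, hlt⟩
          rcases List.mem_cons.mp hm with h' | h'
          · exact absurd ⟨by omega, by omega⟩ hc
          · exact ⟨h', hlt⟩
        · rintro ⟨hm, hlt⟩; exact ⟨List.mem_cons_of_mem _ hm, hlt⟩
      rw [if_congr hmem rfl rfl]

-- A's second sweep accumulated over the column indices
theorem pv_loop2_gen (N : Int) (n : Nat) (hn : n = N.toNat) :
    ∀ (L : List Nat) (r els : List Int),
    L.foldl (fun m x => pvRowsA.foldl (fun m c =>
        if 0 ≤ c ∧ c < N then m.set c.toNat ((m.getD c.toNat []).set x 1) else m) m)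
      ((List.range n).map (fun (i : Nat) => if (i : Int) ∈ pvRowsA ∧ (i : Int) < N then r else els))
    = (List.range n).map (fun (i : Nat) => if (i : Int) ∈ pvRowsA ∧ (i : Int) < N
        then L.foldl (fun s x => s.set x 1) r else els) := by
  intro L
  induction L with
  | nil => intro r els; simp
  | cons x L ih =>
    intro r els
    simp only [List.foldl_cons]
    rw [pv_loop2_inner N n hn x pvRowsA _]
    have hshape : (List.range n).map (fun (i : Nat) =>
        if (i : Int) ∈ pvRowsA ∧ (i : Int) < N
        then (if (i : Int) ∈ pvRowsA ∧ (i : Int) < N then r else els).set x 1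
        else (if (i : Int) ∈ pvRowsA ∧ (i : Int) < N then r else els))
      = (List.range n).map (fun (i : Nat) => if (i : Int) ∈ pvRowsA ∧ (i : Int) < N then r.set x 1 else els) := by
      apply List.map_congr_left
      intro i _
      by_cases h : (i : Int) ∈ pvRowsA ∧ (i : Int) < N <;> simp [h]
    rw [hshape, ih]

-- unguarded sets at all indices of L on a range-indexed row
theorem pv_allfold (n : Nat) :
    ∀ (L : List Nat) (h : Nat → Int),
    L.foldl (fun s x => s.set x 1) ((List.range n).map h)
    = (List.range n).map (fun i => if i ∈ L then 1 else h i) := by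
  intro L
  induction L with
  | nil => intro h; simp
  | cons x L ih =>
    intro h
    simp only [List.foldl_cons]
    rw [pv_set_map_range, ih]
    apply List.map_congr_left
    intro i _
    by_cases hiL : i ∈ L
    · simp [hiL]
    · by_cases hix : i = x <;> simp [hix, hiL]

-- common normal form of both masks
theorem pv_A_norm (N : Int) :
    make_default_streets_mask N
    = (List.range N.toNat).map (fun (i : Nat) =>
        if (i : Int) ∈ pvRowsA ∧ (i : Int) < N then List.replicate N.toNat (1 : Int)
        else (List.range N.toNat).map (fun (x : Nat) =>
          if (x : Int) ∈ pvColsA ∧ (x : Int) < N then (1 : Int) else 0)) := by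
  unfold make_default_streets_mask
  rw [pv_pyRange_cast]
  rw [List.foldl_map, List.foldl_map, List.map_map]
  simp only [Int.toNat_natCast]
  rw [show List.map ((fun (_ : Int) => List.replicate N.toNat (0:Int)) ∘ (fun (k : Nat) => (k : Int))) (List.range N.toNat) = (List.range N.toNat).map (fun (_ : Nat) => List.replicate N.toNat (0:Int)) from rfl]
  simp only [pv_loop1_inner]
  rw [pv_loop1_gen (fun r => pvColsA.foldl (fun r c => if 0 ≤ c ∧ c < N then r.set c.toNat 1 else r) r) N.toNat (List.range N.toNat) (fun _ => List.replicate N.toNat (0:Int)) List.nodup_range (fun y hy => List.mem_range.mp hy)]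
  have hrep : (List.range N.toNat).map (fun (_ : Nat) => (0:Int)) = List.replicate N.toNat (0:Int) := by simp
  have hcorr : List.foldl (fun r c => if 0 ≤ c ∧ c < N then r.set c.toNat 1 else r) (List.replicate N.toNat (0:Int)) pvColsA = (List.range N.toNat).map (fun (x : Nat) => if (x : Int) ∈ pvColsA ∧ (x : Int) < N then (1:Int) else 0) := by
    rw [← hrep, pv_rowfold_gen N N.toNat rfl]
  have hinit : (List.range N.toNat).map (fun (i : Nat) =>
      if i ∈ List.range N.toNat then
        List.foldl (fun r c => if 0 ≤ c ∧ c < N then r.set c.toNat 1 else r) (List.replicate N.toNat 0) pvColsA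
      else List.replicate N.toNat 0)
    = (List.range N.toNat).map (fun (i : Nat) =>
      if (i : Int) ∈ pvRowsA ∧ (i : Int) < N
      then (List.range N.toNat).map (fun (x : Nat) => if (x : Int) ∈ pvColsA ∧ (x : Int) < N then (1:Int) else 0)
      else (List.range N.toNat).map (fun (x : Nat) => if (x : Int) ∈ pvColsA ∧ (x : Int) < N then (1:Int) else 0)) := by
    apply List.map_congr_left
    intro i hi
    rw [if_pos hi, hcorr]; exact (ite_self _).symm
  rw [hinit, pv_loop2_gen N N.toNat rfl (List.range N.toNat) _ _, pv_allfold N.toNat (List.range N.toNat)]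
  apply List.map_congr_left
  intro i hi
  have hone : (List.range N.toNat).map (fun (j : Nat) =>
      if j ∈ List.range N.toNat then (1:Int)
      else if (j : Int) ∈ pvColsA ∧ (j : Int) < N then (1:Int) else 0)
    = List.replicate N.toNat (1:Int) := by
    rw [List.map_congr_left (fun j hj => if_pos hj)]
    simp
  rw [hone]

theorem pv_B_norm (N : Int) :
    make_default_streets_mask_alt N
    = (List.range N.toNat).map (fun (i : Nat) =>
        if (i : Int) ∈ pvRowsA ∧ (i : Int) < N then List.replicate N.toNat (1 : Int)
        else (List.range N.toNat).map (fun (x : Nat) =>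
          if (x : Int) ∈ pvColsA ∧ (x : Int) < N then (1 : Int) else 0)) := by
  unfold make_default_streets_mask_alt
  rw [pv_pyRange_cast, List.map_map]
  have hcon : ∀ z : Int, ((PySem.Set.ofList (List.filter (fun c => decide (c < N)) pvCorridorsB)).contains z) = decide (z ∈ pvCorridorsB ∧ z < N) := by
    intro z
    rw [Bool.eq_iff_iff]
    simp [PySem.Set.mem_ofList, List.mem_filter]
  simp only [hcon, decide_eq_true_eq, List.map_map]
  apply List.map_congr_left
  intro i hi
  rfl

-- ===== VERDICT (by name: the statement is the Claim_ definition above) =====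
theorem make_default_streets_mask_spec : Claim_equal_make_default_streets_mask := by
  intro N _
  unfold Spec_make_default_streets_mask
  rw [pv_A_norm, pv_B_norm]
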